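-- pv_equiv track=rewrite | github.com/armanxbabakhani/QMC-sign-problem | Python/sign_tools.py | indices_to_binary
-- ===== SOURCE A (Python) =====
-- def indices_to_binary(IndicesVector, NumOfSpins):
--     """
--     Converts a list of indices into a binary vector of given length.
--
--     Parameters:
--         indices (list of int): Indices where the binary vector should have 1s.
--         number_of_spins (int): The length of the resulting binary vector.
--
--     Returns:
--         list of int: Binary vector with 1s at the specified indices.
--     """
--     BinaryVector = [0] * NumOfSpins  # Initialize with zeros
--     for index in IndicesVector:
--         if 0 <= index < NumOfSpins:  # Ensure index is within bounds
--             BinaryVector[index] = 1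
--         else:
--             raise ValueError(f"Index {index} is out of bounds for vector of length {NumOfSpins}")
--     return BinaryVector
-- ===== SOURCE B (Python) =====
-- def indices_to_binary(IndicesVector, NumOfSpins):
--     idxset = set()
--     for index in IndicesVector:
--         if not (0 <= index < NumOfSpins):
--             raise ValueError(f"Index {index} is out of bounds for vector of length {NumOfSpins}")
--         idxset.add(index)
--     return [1 if i in idxset else 0 for i in range(NumOfSpins)]
-- ===== Notes on version B (the rewrite author's own statement) =====
-- stated objective: idiomatic
-- what changed: B validates all indices first into a set, then builds the vector by a position-driven comprehension testing set membership over range(NumOfSpins), instead of A's scatter by in-place index assignment into a preallocated list.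
import Mathlib
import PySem

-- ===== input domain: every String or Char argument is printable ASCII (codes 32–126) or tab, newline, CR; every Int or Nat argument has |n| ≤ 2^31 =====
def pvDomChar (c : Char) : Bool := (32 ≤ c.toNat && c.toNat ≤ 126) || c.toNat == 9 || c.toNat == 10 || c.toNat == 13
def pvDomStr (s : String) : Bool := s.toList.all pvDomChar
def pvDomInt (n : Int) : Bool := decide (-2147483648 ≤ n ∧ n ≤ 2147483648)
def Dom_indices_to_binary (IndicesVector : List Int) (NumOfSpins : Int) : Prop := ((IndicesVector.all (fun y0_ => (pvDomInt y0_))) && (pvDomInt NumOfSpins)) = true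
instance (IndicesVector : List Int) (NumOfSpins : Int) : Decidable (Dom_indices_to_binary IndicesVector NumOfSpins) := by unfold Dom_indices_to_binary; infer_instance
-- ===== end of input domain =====

-- B validates all indices first into a set, then builds the vector position-by-position
-- by set membership over range(NumOfSpins), instead of A's in-place scatter; return values agree on Pre_.

-- ===== PORT A =====
-- for index in IndicesVector: if in bounds, BinaryVector[index] = 1; else raise ValueError (excluded by Pre_; the fold keeps the state there)
def indices_to_binary (IndicesVector : List Int) (NumOfSpins : Int) : List Int :=
  IndicesVector.foldl
    (fun BinaryVector index =>
      if 0 ≤ index ∧ index < NumOfSpins then BinaryVector.set index.toNat 1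
      else BinaryVector)  -- Python raises ValueError here; Pre_ excludes these inputs
    (List.replicate NumOfSpins.toNat 0)

-- ===== PORT B =====
-- validation pass building idxset (the raise branch, excluded by Pre_, leaves the set unchanged), then position-driven gather
def indices_to_binary_alt (IndicesVector : List Int) (NumOfSpins : Int) : List Int :=
  let idxset : PySem.Set Int :=
    IndicesVector.foldl
      (fun s index =>
        if 0 ≤ index ∧ index < NumOfSpins then PySem.Set.add s index
        else s)  -- Python raises ValueError here; Pre_ excludes these inputs
      PySem.Set.empty
  (PySem.List.pyRange 0 NumOfSpins 1).map (fun i => if i ∈ idxset then (1 : Int) else 0)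

-- ===== PRECONDITION & SPEC =====
-- Pre_: every index is in bounds; on any other input the Python A raises ValueError.
def Pre_indices_to_binary (IndicesVector : List Int) (NumOfSpins : Int) : Prop :=
  ∀ index ∈ IndicesVector, 0 ≤ index ∧ index < NumOfSpins
instance (IndicesVector : List Int) (NumOfSpins : Int) : Decidable (Pre_indices_to_binary IndicesVector NumOfSpins) := by unfold Pre_indices_to_binary; infer_instance

def pvWitness_indices_to_binary : List Int × Int := ([0, 2, 2], 4)

def Spec_indices_to_binary (IndicesVector : List Int) (NumOfSpins : Int) (out : List Int) : Prop := out = indices_to_binary_alt IndicesVector NumOfSpins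
instance (IndicesVector : List Int) (NumOfSpins : Int) (out : List Int) : Decidable (Spec_indices_to_binary IndicesVector NumOfSpins out) := by unfold Spec_indices_to_binary; infer_instance

-- ===== CLAIM (what is proved, stated in full; the proofs are below) =====
def Claim_equal_indices_to_binary : Prop := ∀ (IndicesVector : List Int) (NumOfSpins : Int), Dom_indices_to_binary IndicesVector NumOfSpins → Pre_indices_to_binary IndicesVector NumOfSpins → Spec_indices_to_binary IndicesVector NumOfSpins (indices_to_binary IndicesVector NumOfSpins)

-- ===== LEMMAS AND PROOFS =====

-- A's fold: length is preserved and entry j is 1 if j was hit, otherwise the initial entry.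
theorem fold_set_getElem? (IndicesVector : List Int) (NumOfSpins : Int) (L : List Int)
    (h : ∀ index ∈ IndicesVector, 0 ≤ index ∧ index < NumOfSpins)
    (hL : (L.length : Int) = max NumOfSpins 0) (j : Nat) :
    (IndicesVector.foldl
      (fun BinaryVector index =>
        if 0 ≤ index ∧ index < NumOfSpins then BinaryVector.set index.toNat 1
        else BinaryVector) L)[j]? =
    if (j : Int) ∈ IndicesVector then (if (j : Int) < NumOfSpins then some 1 else none) else L[j]? := by
  induction IndicesVector generalizing L with
  | nil =>
    simp
  | cons i rest ih =>
    have hi := h i (by simp)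
    simp only [List.foldl_cons, if_pos hi]
    rw [ih (h := fun x hx => h x (List.mem_cons_of_mem _ hx)) (hL := by simpa using hL)]
    by_cases hmem : (j : Int) ∈ rest
    · simp [hmem]
    · by_cases hji : (j : Int) = i
      · have hjN : (j : Int) < NumOfSpins := hji ▸ hi.2
        have hjt : i.toNat = j := by omega
        have hjlen : j < L.length := by omega
        simp [hmem, hji, hjt, List.getElem?_set_eq_of_lt 1 hjlen, hjN]
        exact fun _ => hi.2
      · have : i.toNat ≠ j := by omega
        simp [hmem, hji, List.getElem?_set_ne this]

-- B's validated fold builds exactly set(IndicesVector) membership-wise under Pre_.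
theorem mem_fold_add (IndicesVector : List Int) (NumOfSpins : Int) (s : PySem.Set Int)
    (h : ∀ index ∈ IndicesVector, 0 ≤ index ∧ index < NumOfSpins) (x : Int) :
    x ∈ IndicesVector.foldl
      (fun s index => if 0 ≤ index ∧ index < NumOfSpins then PySem.Set.add s index else s) s ↔
    x ∈ s ∨ x ∈ IndicesVector := by
  induction IndicesVector generalizing s with
  | nil => simp
  | cons i rest ih =>
    have hi := h i (by simp)
    simp only [List.foldl_cons, if_pos hi]
    rw [ih (h := fun y hy => h y (List.mem_cons_of_mem _ hy)), PySem.Set.mem_add]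
    simp only [List.mem_cons]
    tauto

-- ===== VERDICT (by name: the statement is the Claim_ definition above) =====
theorem indices_to_binary_spec : Claim_equal_indices_to_binary := by
  intro IndicesVector NumOfSpins _ hpre
  unfold Spec_indices_to_binary indices_to_binary indices_to_binary_alt
  apply List.ext_getElem?
  intro j
  rw [fold_set_getElem? IndicesVector NumOfSpins _ hpre (by simp) j]
  rw [List.getElem?_map]
  by_cases hj : j < NumOfSpins.toNat
  · have hget : (PySem.List.pyRange 0 NumOfSpins 1)[j]? = some (j : Int) := by
      rw [List.getElem?_eq_getElem (by rw [PySem.List.length_pyRange_one]; omega)]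
      rw [PySem.List.getElem_pyRange_one]
      simp
    rw [hget]
    simp only [Option.map_some]
    simp only [mem_fold_add IndicesVector NumOfSpins PySem.Set.empty hpre]
    by_cases hmem : (j : Int) ∈ IndicesVector
    · simp [hmem, show ((j : Int) < NumOfSpins) by omega]
    · simp [hmem, PySem.Set.empty, hj]
  · have hnone : (PySem.List.pyRange 0 NumOfSpins 1)[j]? = none := by
      rw [List.getElem?_eq_none]
      rw [PySem.List.length_pyRange_one]; omega
    rw [hnone]
    by_cases hmem : (j : Int) ∈ IndicesVector
    · have := hpre _ hmem
      simp [hmem, show ¬ ((j : Int) < NumOfSpins) by omega]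
    · simp [hmem, hj]
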